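-- pv_equiv track=rewrite | github.com/Bigsby/aoc | 2020/day_24/py/common.py | flipInitialTiles
-- ===== SOURCE A (Python) =====
-- steps = {
--     "e": (1,-1,0),
--     "se": (0,-1,1),
--     "sw": (-1,0,1),
--     "w": (-1,1,0),
--     "nw": (0,1,-1),
--     "ne": (1,0,-1)
-- }
--
-- def flipInitialTiles(tilePaths):
--     tiles = {}
--     for path in tilePaths:
--         current = (0,0,0)
--         for direction in path:
--             step = steps[direction]
--             current = current[0] + step[0], current[1] + step[1], current[2] + step[2]
--         if current in tiles:
--             tiles[current] = not tiles[current]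
--         else:
--             tiles[current] = True
--     return tiles
-- ===== SOURCE B (Python) =====
-- steps = {
--     "e": (1,-1,0),
--     "se": (0,-1,1),
--     "sw": (-1,0,1),
--     "w": (-1,1,0),
--     "nw": (0,1,-1),
--     "ne": (1,0,-1)
-- }
--
-- def flipInitialTiles(tilePaths):
--     dests = []
--     for path in tilePaths:
--         # group the path: one steps[] lookup and one multiply-accumulate per DISTINCT direction
--         freq = {}
--         for direction in path:
--             freq[direction] = freq.get(direction, 0) + 1
--         x = y = z = 0
--         for direction, n in freq.items():
--             dx, dy, dz = steps[direction]
--             x += n * dx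
--             y += n * dy
--             z += n * dz
--         dests.append((x, y, z))
--     # a tile is black iff an odd number of paths end on it; duplicate keys in the
--     # comprehension overwrite with the same value, so first-occurrence order is kept
--     return {c: dests.count(c) % 2 == 1 for c in dests}
-- ===== Notes on version B (the rewrite author's own statement) =====
-- stated objective: alternative
-- what changed: Per path, B builds a direction-frequency dict and multiply-accumulates count*step per DISTINCT direction (A folds the steps table one step at a time); globally, B collects all destinations in a list and returns a comprehension keyed by dests.count(c) % 2 == 1 (A toggles a boolean dict in place per path).
import Mathlib
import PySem

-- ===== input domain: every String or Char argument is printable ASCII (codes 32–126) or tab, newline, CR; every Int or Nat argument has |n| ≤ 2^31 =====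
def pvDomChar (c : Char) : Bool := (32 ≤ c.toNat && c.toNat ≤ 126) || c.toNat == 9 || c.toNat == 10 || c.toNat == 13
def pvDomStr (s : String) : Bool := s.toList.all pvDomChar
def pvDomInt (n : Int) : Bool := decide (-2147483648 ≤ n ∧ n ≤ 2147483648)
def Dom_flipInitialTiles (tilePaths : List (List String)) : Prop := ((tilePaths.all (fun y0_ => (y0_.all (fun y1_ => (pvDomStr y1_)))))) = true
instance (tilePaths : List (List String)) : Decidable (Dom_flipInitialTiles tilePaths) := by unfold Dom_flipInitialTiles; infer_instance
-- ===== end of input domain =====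

-- B replaces A's per-step fold and in-place boolean toggling by direction counting
-- (a closed form per path) and a count-parity comprehension over the destination list
-- (alternative decomposition, not claimed faster).

-- ===== PORT A =====
-- the module-level `steps` dict
def stepsDict : PySem.Dict String (Int × Int × Int) :=
  PySem.Dict.ofList [("e",(1,-1,0)), ("se",(0,-1,1)), ("sw",(-1,0,1)),
                     ("w",(-1,1,0)), ("nw",(0,1,-1)), ("ne",(1,0,-1))]

-- A's inner `for direction in path` loop
-- (steps[direction] raises KeyError on an unknown direction: those inputs are outside
--  Pre_; the (0,0,0) default is never consulted under Pre_)
def pathDest (path : List String) : Int × Int × Int :=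
  path.foldl (fun current direction =>
    let step := stepsDict.getD direction (0, 0, 0)
    (current.1 + step.1, current.2.1 + step.2.1, current.2.2 + step.2.2)) (0, 0, 0)

def flipInitialTiles (tilePaths : List (List String)) : List (Int × Int × Int × Bool) :=
  let tiles : PySem.Dict (Int × Int × Int) Bool :=
    tilePaths.foldl (fun tiles path =>
      let current := pathDest path
      if tiles.contains current then
        tiles.insert current (! tiles.getD current false)
      else
        tiles.insert current true) PySem.Dict.empty
  tiles.items.map (fun p => (p.1.1, p.1.2.1, p.1.2.2, p.2))

-- ===== PORT B =====
-- Source B's per-path grouping: a frequency dict, then one steps[] lookup and one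
-- multiply-accumulate per distinct direction
def pathDestB (path : List String) : Int × Int × Int :=
  let freq : PySem.Dict String Int :=
    path.foldl (fun freq direction => freq.insert direction (freq.getD direction 0 + 1))
      PySem.Dict.empty
  freq.items.foldl (fun acc p =>
    let step := stepsDict.getD p.1 (0, 0, 0)
    (acc.1 + p.2 * step.1, acc.2.1 + p.2 * step.2.1, acc.2.2 + p.2 * step.2.2)) (0, 0, 0)

def flipInitialTiles_alt (tilePaths : List (List String)) : List (Int × Int × Int × Bool) :=
  let dests := tilePaths.map pathDestB
  let out : PySem.Dict (Int × Int × Int) Bool :=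
    dests.foldl (fun d c =>
      d.insert c (decide (PySem.Int.mod ((PySem.List.count dests c : Nat) : Int) 2 = 1)))
      PySem.Dict.empty
  out.items.map (fun p => (p.1.1, p.1.2.1, p.1.2.2, p.2))

-- ===== PRECONDITION & SPEC =====
-- Pre_ excludes exactly the inputs containing a direction string outside the `steps`
-- table, on which the Python A raises KeyError.
def Pre_flipInitialTiles (tilePaths : List (List String)) : Prop :=
  (tilePaths.all (fun path => path.all (fun d =>
    d ∈ (["e", "se", "sw", "w", "nw", "ne"] : List String)))) = true
instance (tilePaths : List (List String)) : Decidable (Pre_flipInitialTiles tilePaths) := by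
  unfold Pre_flipInitialTiles; infer_instance

def pvWitness_flipInitialTiles : List (List String) := [["e", "e", "nw"], [], ["w"]]

def Spec_flipInitialTiles (tilePaths : List (List String)) (out : List (Int × Int × Int × Bool)) : Prop := out = flipInitialTiles_alt tilePaths
instance (tilePaths : List (List String)) (out : List (Int × Int × Int × Bool)) : Decidable (Spec_flipInitialTiles tilePaths out) := by unfold Spec_flipInitialTiles; infer_instance

-- ===== CLAIM (what is proved, stated in full; the proofs are below) =====
def Claim_equal_flipInitialTiles : Prop := ∀ (tilePaths : List (List String)), Dom_flipInitialTiles tilePaths → Pre_flipInitialTiles tilePaths → Spec_flipInitialTiles tilePaths (flipInitialTiles tilePaths)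

-- ===== LEMMAS AND PROOFS =====

-- parity of a Nat count
def pvPar (n : Nat) : Bool := n % 2 == 1

theorem pvPar_succ (n : Nat) : pvPar (n + 1) = ! pvPar n := by
  rcases Nat.mod_two_eq_zero_or_one n with h | h <;> simp [pvPar, Nat.add_mod, h]

-- B's parity expression equals pvPar of the count
theorem pvPar_eq_int (n : Nat) :
    decide (PySem.Int.mod ((n : Nat) : Int) 2 = 1) = pvPar n := by
  have h2 : ((n : Nat) : Int) % 2 = ((n % 2 : Nat) : Int) := (Int.natCast_mod n 2).symm
  rcases Nat.mod_two_eq_zero_or_one n with hn | hn <;> simp [pvPar, h2, hn]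

-- A's per-path fold equals B's counting formula, for paths of known directions
-- a componentwise fold of additions is a list sum
theorem foldl_add3 {β : Type} (l : List β) (g : β → Int × Int × Int) (a : Int × Int × Int) :
    l.foldl (fun acc x => acc + g x) a = a + (l.map g).sum := by
  induction l generalizing a with
  | nil => simp
  | cons x xs ih => simp [ih, add_assoc]

-- A's per-step fold equals B's grouped multiply-accumulate (grouping a sum by equal
-- summands; holds for every path, the (0,0,0) default included)
theorem pathDest_eq (path : List String) : pathDest path = pathDestB path := by
  unfold pathDest pathDestB
  simp only [PySem.Dict.foldl_insert_getD_add_one_eq_counter, PySem.Dict.items_counter]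
  rw [show (fun (current : Int × Int × Int) (direction : String) =>
        let step := stepsDict.getD direction (0, 0, 0)
        (current.1 + step.1, current.2.1 + step.2.1, current.2.2 + step.2.2))
      = (fun acc d => acc + stepsDict.getD d (0, 0, 0)) from rfl]
  rw [show (fun (acc : Int × Int × Int) (p : String × Int) =>
        let step := stepsDict.getD p.1 (0, 0, 0)
        (acc.1 + p.2 * step.1, acc.2.1 + p.2 * step.2.1, acc.2.2 + p.2 * step.2.2))
      = (fun acc p => acc + p.2 • stepsDict.getD p.1 (0, 0, 0)) from rfl]
  rw [foldl_add3, foldl_add3, List.map_map]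
  congr 1
  rw [show ((fun (p : String × Int) => p.2 • stepsDict.getD p.1 (0, 0, 0)) ∘
        (fun k => (k, (List.count k path : Int))))
      = (fun k => (List.count k path : Int) • stepsDict.getD k (0, 0, 0)) from rfl]
  rw [Finset.sum_list_map_count path (fun d => stepsDict.getD d (0, 0, 0)),
    ← List.sum_toFinset _ (PySem.Set.nodup_ofList path),
    show (PySem.Set.ofList path).toFinset = path.toFinset by
      ext a; simp [List.mem_toFinset, PySem.Set.mem_ofList]]
  exact Finset.sum_congr rfl (fun m _ => natCast_zsmul _ _)
-- A's dict-toggling fold, characterised: items = first-occurrence keys with count parity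
theorem A_items (l : List (Int × Int × Int)) :
    (l.foldl (fun tiles current =>
        if tiles.contains current then
          tiles.insert current (! tiles.getD current false)
        else
          tiles.insert current true) PySem.Dict.empty).items
      = (PySem.Set.ofList l).map (fun k => (k, pvPar (List.count k l))) := by
  induction l using List.reverseRecOn with
  | nil => rfl
  | append_singleton xs x ih =>
    rw [List.foldl_append, List.foldl_cons, List.foldl_nil, PySem.Set.ofList_append_singleton]
    set t := xs.foldl (fun tiles current =>
      if tiles.contains current then
        tiles.insert current (! tiles.getD current false)
      else
        tiles.insert current true) PySem.Dict.empty with ht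
    have hkeys : t.keys = PySem.Set.ofList xs := by
      simp only [PySem.Dict.keys, ih, List.map_map]
      exact List.map_id'' (fun _ => rfl) _
    have hnodup : t.keys.Nodup := by rw [hkeys]; exact PySem.Set.nodup_ofList xs
    have hcont : t.contains x = decide (x ∈ xs) := by
      rw [PySem.Dict.contains_eq_decide_mem_keys, hkeys]
      simp [PySem.Set.mem_ofList]
    by_cases hx : x ∈ xs
    · have hc : t.contains x = true := by simp [hcont, hx]
      have hmem : (x, pvPar (List.count x xs)) ∈ t.items := by
        rw [ih]
        exact List.mem_map_of_mem ((PySem.Set.mem_ofList xs x).mpr hx)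
      have hget : t.getD x false = pvPar (List.count x xs) :=
        PySem.Dict.getD_of_mem_items t hmem hnodup false
      rw [if_pos hc, PySem.Dict.items_insert_of_contains t _ hc, ih,
        PySem.Set.add_of_mem (by simp [PySem.Set.mem_ofList, hx]), List.map_map]
      apply List.map_congr_left
      intro k _
      by_cases hkx : k = x
      · subst hkx
        simp [hget, List.count_append, pvPar_succ]
      · have hxk : x ≠ k := Ne.symm hkx
        simp [List.count_append, hxk, hkx]
    · have hc : t.contains x = false := by simp [hcont, hx]
      have hcnt : List.count x xs = 0 := List.count_eq_zero.mpr hx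
      rw [if_neg (by simp [hc]), PySem.Dict.items_insert_of_not_contains t _ hc, ih,
        PySem.Set.add_of_not_mem (by simp [PySem.Set.mem_ofList, hx]), List.map_append]
      congr 1
      · apply List.map_congr_left
        intro k hk
        have hkx : k ≠ x := fun h => hx ((PySem.Set.mem_ofList xs x).mp (h ▸ hk))
        have hxk : x ≠ k := Ne.symm hkx
        simp [List.count_append, hxk]
      · simp [List.count_append, hcnt, pvPar]

-- B's constant-value insertion fold, characterised
theorem B_items (l : List (Int × Int × Int)) (g : (Int × Int × Int) → Bool) :
    (l.foldl (fun d c => d.insert c (g c)) PySem.Dict.empty).items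
      = (PySem.Set.ofList l).map (fun k => (k, g k)) := by
  induction l using List.reverseRecOn with
  | nil => rfl
  | append_singleton xs x ih =>
    rw [List.foldl_append, List.foldl_cons, List.foldl_nil, PySem.Set.ofList_append_singleton]
    set t := xs.foldl (fun d c => d.insert c (g c)) PySem.Dict.empty with ht
    have hkeys : t.keys = PySem.Set.ofList xs := by
      simp only [PySem.Dict.keys, ih, List.map_map]
      exact List.map_id'' (fun _ => rfl) _
    have hcont : t.contains x = decide (x ∈ xs) := by
      rw [PySem.Dict.contains_eq_decide_mem_keys, hkeys]
      simp [PySem.Set.mem_ofList]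
    by_cases hx : x ∈ xs
    · rw [PySem.Dict.items_insert_of_contains t (g x) (by simp [hcont, hx]), ih,
        PySem.Set.add_of_mem (by simp [PySem.Set.mem_ofList, hx]), List.map_map]
      apply List.map_congr_left
      intro k _
      by_cases hk : k = x <;> simp [hk]
    · rw [PySem.Dict.items_insert_of_not_contains t (g x) (by simp [hcont, hx]), ih,
        PySem.Set.add_of_not_mem (by simp [PySem.Set.mem_ofList, hx]), List.map_append]
      rfl

-- ===== VERDICT (by name: the statement is the Claim_ definition above) =====
theorem flipInitialTiles_spec : Claim_equal_flipInitialTiles := by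
  intro tilePaths _ _
  unfold Spec_flipInitialTiles flipInitialTiles flipInitialTiles_alt
  have hmap : List.map pathDestB tilePaths = List.map pathDest tilePaths :=
    List.map_congr_left (fun p _ => (pathDest_eq p).symm)
  simp only [hmap]
  have hA : (tilePaths.foldl (fun tiles path =>
      let current := pathDest path
      if tiles.contains current then tiles.insert current (! tiles.getD current false)
      else tiles.insert current true) PySem.Dict.empty)
    = ((tilePaths.map pathDest).foldl (fun tiles current =>
      if tiles.contains current then tiles.insert current (! tiles.getD current false)
      else tiles.insert current true) PySem.Dict.empty) :=
    (List.foldl_map (f := pathDest)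
      (g := fun tiles current =>
        if tiles.contains current then tiles.insert current (! tiles.getD current false)
        else tiles.insert current true)
      (l := tilePaths) (init := PySem.Dict.empty)).symm
  rw [hA, A_items (tilePaths.map pathDest), B_items (tilePaths.map pathDest) _]
  congr 1
  apply List.map_congr_left
  intro k _
  rw [PySem.List.count_eq, pvPar_eq_int]
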